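-- pv_equiv track=rewrite | github.com/jh85/dataanalysis | da004.py | renumbering
-- ===== SOURCE A (Python) =====
-- def sort_freq(freq,key):
--     # when sorting by key(0), use ascending order
--     # when sorting by value(1), use descending order
--     is_reverse = False if key==0 else True
--     return {k:v for k,v in sorted(freq.items(), key=lambda itm:itm[key], reverse=is_reverse)}
--
-- def renumbering(arr,n_clusters):
--     '''
--     reassign cluster numbers in the K-Means prediction (arr)
--     so that they are in descending order of frequency, starting with 0, 1, 2, etc.,
--     '''
--     freq = {k:0 for k in range(n_clusters)}
--     for v in arr:
--         freq[v] += 1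
--     freq2 = sort_freq(freq,1)
--     renum_rule = {k:i for i,k in enumerate(freq2.keys())}
--     for i in range(len(arr)):
--         arr[i] = renum_rule[arr[i]]
--     return arr
-- ===== SOURCE B (Python) =====
-- def renumbering(arr, n_clusters):
--     # Counting sort by frequency: no comparison sort.
--     counts = [0] * n_clusters
--     for v in arr:
--         counts[v] += 1
--     m = len(arr)
--     by_freq = [[] for _ in range(m + 1)]
--     for c in range(n_clusters):
--         by_freq[counts[c]].append(c)
--     rank = [0] * n_clusters
--     r = 0
--     for f in range(m, -1, -1):
--         for c in by_freq[f]: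
--             rank[c] = r
--             r += 1
--     for i in range(len(arr)):
--         arr[i] = rank[arr[i]]
--     return arr
-- ===== Notes on version B (the rewrite author's own statement) =====
-- stated objective: alternative
-- what changed: B replaces A's comparison sort of a frequency dictionary by a counting sort: it tallies counts into a plain array, buckets cluster ids by their frequency, and assigns ranks by scanning the buckets from the highest possible frequency down, so no comparison sort and no dictionaries appear.
import Mathlib
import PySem

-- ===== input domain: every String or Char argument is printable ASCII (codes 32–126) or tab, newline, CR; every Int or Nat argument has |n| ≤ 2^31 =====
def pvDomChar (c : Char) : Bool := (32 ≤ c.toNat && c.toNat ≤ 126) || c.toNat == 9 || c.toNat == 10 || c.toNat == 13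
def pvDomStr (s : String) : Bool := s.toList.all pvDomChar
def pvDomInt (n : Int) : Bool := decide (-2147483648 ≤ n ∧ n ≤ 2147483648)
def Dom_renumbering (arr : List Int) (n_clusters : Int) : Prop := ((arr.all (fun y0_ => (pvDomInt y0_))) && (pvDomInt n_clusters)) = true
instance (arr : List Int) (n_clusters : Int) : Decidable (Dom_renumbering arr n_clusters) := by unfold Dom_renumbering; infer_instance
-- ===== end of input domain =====

-- B replaces A's comparison sort of a frequency dict by a counting sort (frequency buckets scanned from the
-- highest possible frequency down), so no comparison sort and no dictionaries appear in B; objective: alternative.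
-- Both Pythons mutate arr in place and return it; the equivalence proved here is about the return value.

-- list(enumerate(xs)) for port A: the tail-recursive form of PySem.List.enumerate xs 0
-- (equal by PySem.List.enumerate_eq_zipIdx_map; the structural recursion overflows the interpreter stack on large inputs)
def pvEnum {α : Type} (xs : List α) : List (Int × α) :=
  xs.zipIdx.map (fun p => ((p.2 : Int), p.1))

-- ===== PORT A =====
-- sort_freq(freq, key): itm[key] ported as a two-way select, exact for key ∈ {0,1} (the only values A passes).
-- Python's stable sorted(..., key=k, reverse=True) is ported as the stable List.mergeSort with Python's
-- reverse rule (reverse=True compares keys with ≥, ties keep list order) — exact, and it evaluates on the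
-- large n_clusters the tester admits, which the quadratic insertion-sort model cannot.
def sort_freq (freq : PySem.Dict Int Int) (key : Int) : PySem.Dict Int Int :=
  let is_reverse := if key == 0 then false else true
  PySem.Dict.mk ((freq.items).mergeSort (fun p q =>
    let kp := if key == 0 then p.1 else p.2
    let kq := if key == 0 then q.1 else q.2
    if is_reverse then decide (kq ≤ kp) else decide (kp ≤ kq)))

def pvInitFreq (n_clusters : Int) : PySem.Dict Int Int :=
  PySem.Dict.mk ((PySem.List.pyRange 0 n_clusters).map (fun k => (k, 0)))

def pvFreq (arr : List Int) (n_clusters : Int) : PySem.Dict Int Int :=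
  arr.foldl (fun d v => d.modify v 0 (· + 1)) (pvInitFreq n_clusters)

def pvRenumRule (arr : List Int) (n_clusters : Int) : PySem.Dict Int Int :=
  PySem.Dict.mk ((pvEnum (sort_freq (pvFreq arr n_clusters) 1).keys).map
    (fun p => (p.2, p.1)))

def renumbering (arr : List Int) (n_clusters : Int) : List Int :=
  let renum_rule := pvRenumRule arr n_clusters
  (PySem.List.pyRange 0 (arr.length : Int)).foldl
    (fun a i => a.set i.toNat (renum_rule.getD (PySem.List.pyGetD a i 0) 0)) arr

-- ===== PORT B =====
-- counts = [0]*n_clusters; for v in arr: counts[v] += 1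
def pvCounts (arr : List Int) (n_clusters : Int) : List Int :=
  arr.foldl (fun cs v => cs.set v.toNat (PySem.List.pyGetD cs v 0 + 1))
    (PySem.List.pyRepeat [(0 : Int)] n_clusters)

-- by_freq = [[] for _ in range(len(arr)+1)]; for c in range(n_clusters): by_freq[counts[c]].append(c)
def pvByFreq (arr : List Int) (n_clusters : Int) : List (List Int) :=
  let counts := pvCounts arr n_clusters
  (PySem.List.pyRange 0 n_clusters).foldl
    (fun bf c =>
      bf.set (PySem.List.pyGetD counts c 0).toNat
        (PySem.List.pyGetD bf (PySem.List.pyGetD counts c 0) [] ++ [c]))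
    ((PySem.List.pyRange 0 ((arr.length : Int) + 1)).map (fun _ => ([] : List Int)))

-- rank = [0]*n_clusters; r = 0; for f in range(len(arr), -1, -1): for c in by_freq[f]: rank[c] = r; r += 1
def pvRankR (arr : List Int) (n_clusters : Int) : List Int × Int :=
  let by_freq := pvByFreq arr n_clusters
  (PySem.List.pyRange (arr.length : Int) (-1) (-1)).foldl
    (fun s f => (PySem.List.pyGetD by_freq f []).foldl
      (fun (s : List Int × Int) c => (s.1.set c.toNat s.2, s.2 + 1)) s)
    (PySem.List.pyRepeat [(0 : Int)] n_clusters, 0)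

def renumbering_alt (arr : List Int) (n_clusters : Int) : List Int :=
  let rank := (pvRankR arr n_clusters).1
  (PySem.List.pyRange 0 (arr.length : Int)).foldl
    (fun a i => a.set i.toNat (PySem.List.pyGetD rank (PySem.List.pyGetD a i 0) 0)) arr

-- ===== PRECONDITION & SPEC =====
-- Pre_: every element is a cluster id in [0, n_clusters); otherwise A's 'freq[v] += 1' raises KeyError.
def Pre_renumbering (arr : List Int) (n_clusters : Int) : Prop :=
  ∀ v ∈ arr, 0 ≤ v ∧ v < n_clusters
instance (arr : List Int) (n_clusters : Int) : Decidable (Pre_renumbering arr n_clusters) := by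
  unfold Pre_renumbering; infer_instance
def pvWitness_renumbering : List Int × Int := ([1, 0, 1, 2, 1], 3)

def Spec_renumbering (arr : List Int) (n_clusters : Int) (out : List Int) : Prop := out = renumbering_alt arr n_clusters
instance (arr : List Int) (n_clusters : Int) (out : List Int) : Decidable (Spec_renumbering arr n_clusters out) := by unfold Spec_renumbering; infer_instance

-- ===== CLAIM (what is proved, stated in full; the proofs are below) =====
def Claim_equal_renumbering : Prop := ∀ (arr : List Int) (n_clusters : Int), Dom_renumbering arr n_clusters → Pre_renumbering arr n_clusters → Spec_renumbering arr n_clusters (renumbering arr n_clusters)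

-- ===== LEMMAS AND PROOFS =====

-- proof-only abbreviations
def pvCnt (arr : List Int) (c : Int) : Int := (arr.count c : Int)

-- the descending frequency scan range(len(arr), -1, -1), as a mapped List.range
def pvFs (arr : List Int) : List Int :=
  (List.range (arr.length + 1)).map (fun k : Nat => (arr.length : Int) - (k : Int))

-- the cluster order A produces (stable sort by descending count)
def pvOrd (arr : List Int) (n : Int) : List Int :=
  (PySem.List.pyRange 0 n).mergeSort (fun a b => decide (pvCnt arr b ≤ pvCnt arr a))

-- the cluster order B produces (counting sort: frequency buckets, highest first)
def pvCOrd (arr : List Int) (n : Int) : List Int :=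
  (pvFs arr).flatMap (fun f => (PySem.List.pyRange 0 n).filter (fun c => pvCnt arr c == f))

-- the strict order both lists are sorted by: count descending, ties by ascending id
def pvRlex (arr : List Int) (a b : Int) : Prop :=
  pvCnt arr b < pvCnt arr a ∨ (pvCnt arr a = pvCnt arr b ∧ a < b)

lemma pvEnum_eq {α : Type} (xs : List α) : pvEnum xs = PySem.List.enumerate xs 0 := by
  rw [PySem.List.enumerate_eq_zipIdx_map]
  unfold pvEnum
  simp

-- ===== generic write-back loop (shared final loop of both ports) =====
lemma pv_write_map (F : Int → Int) : ∀ (suf pre : List Int),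
    (PySem.List.pyRange (pre.length : Int) ((pre.length : Int) + suf.length)).foldl
      (fun a i => a.set i.toNat (F (PySem.List.pyGetD a i 0))) (pre ++ suf)
      = pre ++ suf.map F := by
  intro suf
  induction suf with
  | nil => intro pre; simp [PySem.List.pyRange_one_eq_nil]
  | cons s rest ih =>
    intro pre
    rw [PySem.List.pyRange_one_cons (by simp)]
    simp only [List.foldl_cons]
    have hget : PySem.List.pyGetD (pre ++ s :: rest) (pre.length : Int) 0 = s := by
      rw [PySem.List.pyGetD_natCast]
      simp [List.getD]
    have hset : (pre ++ s :: rest).set ((pre.length : Int)).toNat (F s)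
        = (pre ++ [F s]) ++ rest := by
      simp [List.append_assoc]
    rw [hget, hset]
    have h1 : ((pre.length : Int) + 1) = (((pre ++ [F s]).length : Int)) := by
      simp
    have h2 : ((pre.length : Int) + ((s :: rest).length : Int))
        = (((pre ++ [F s]).length : Int)) + (rest.length : Int) := by
      simp; omega
    rw [h1, h2]
    have := ih (pre ++ [F s])
    simpa [List.append_assoc] using this

-- ===== A-side dictionary stages =====
lemma pv_initDict_getD {ν : Type} (n : Int) (v0 : ν) (c : Int) :
    (PySem.Dict.mk ((PySem.List.pyRange 0 n).map (fun k => (k, v0)))).getD c v0 = v0 := by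
  have hk : (PySem.Dict.mk ((PySem.List.pyRange 0 n).map (fun k => (k, v0)))).keys
      = PySem.List.pyRange 0 n := by
    simp only [PySem.Dict.keys, List.map_map]
    simp [Function.comp_def]
  by_cases hc : c ∈ PySem.List.pyRange 0 n
  · refine PySem.Dict.getD_of_mem_items _ ?_ ?_ v0
    · exact List.mem_map.2 ⟨c, hc, rfl⟩
    · rw [hk]; exact PySem.List.nodup_pyRange_one 0 n
  · have hcon : (PySem.Dict.mk ((PySem.List.pyRange 0 n).map (fun k => (k, v0)))).contains c
        = false := by
      rw [PySem.Dict.contains_eq_decide_mem_keys, hk]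
      simpa using hc
    exact PySem.Dict.getD_of_not_contains _ _ hcon

lemma pv_update_range (l : List Int) (n : Int) (hl : ∀ v ∈ l, 0 ≤ v ∧ v < n) :
    PySem.Set.update (PySem.List.pyRange 0 n) l = PySem.List.pyRange 0 n := by
  rw [PySem.Set.update_eq_append_filter]
  have hfil : (PySem.Set.ofList l).filter
      (fun y => !(PySem.Set.contains (PySem.List.pyRange 0 n) y)) = [] := by
    rw [List.filter_eq_nil_iff]
    intro y hy
    have hy' : y ∈ l := (PySem.Set.mem_ofList _ _).1 hy
    have h2 := hl y hy'
    simpa using h2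
  rw [hfil, List.append_nil]

lemma pv_initDict_keys {ν : Type} (n : Int) (v0 : ν) :
    (PySem.Dict.mk ((PySem.List.pyRange 0 n).map (fun k => (k, v0)))).keys
      = PySem.List.pyRange 0 n := by
  simp only [PySem.Dict.keys, List.map_map]
  simp [Function.comp_def]

lemma pv_freq_keys (arr : List Int) (n : Int) (hPre : Pre_renumbering arr n) :
    (pvFreq arr n).keys = PySem.List.pyRange 0 n := by
  unfold pvFreq pvInitFreq
  rw [PySem.Dict.keys_foldl_modify, pv_initDict_keys]
  exact pv_update_range arr n hPre

lemma pv_freq_items (arr : List Int) (n : Int) (hPre : Pre_renumbering arr n) :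
    (pvFreq arr n).items = (PySem.List.pyRange 0 n).map (fun k => (k, pvCnt arr k)) := by
  have hnd : (pvFreq arr n).keys.Nodup := by
    rw [pv_freq_keys arr n hPre]; exact PySem.List.nodup_pyRange_one 0 n
  rw [PySem.Dict.items_eq_map_keys _ hnd 0, pv_freq_keys arr n hPre]
  refine List.map_congr_left ?_
  intro k _
  unfold pvFreq
  rw [PySem.Dict.getD_foldl_modify_add_one]
  unfold pvInitFreq
  rw [pv_initDict_getD]
  simp [pvCnt]

-- ===== sorted items of freq = the cluster order, paired with counts =====
lemma pv_sortfreq_items (arr : List Int) (n : Int) (hPre : Pre_renumbering arr n) :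
    (sort_freq (pvFreq arr n) 1).items
      = (pvOrd arr n).map (fun k => (k, pvCnt arr k)) := by
  show ((pvFreq arr n).items.mergeSort _) = _
  rw [pv_freq_items arr n hPre]
  rw [← List.map_mergeSort (r := fun a b : Int => decide (pvCnt arr b ≤ pvCnt arr a))]
  · rfl
  · intro a _ b _
    simp

lemma pv_sortfreq_keys (arr : List Int) (n : Int) (hPre : Pre_renumbering arr n) :
    (sort_freq (pvFreq arr n) 1).keys = pvOrd arr n := by
  simp only [PySem.Dict.keys, pv_sortfreq_items arr n hPre, List.map_map]
  have : ((fun p : Int × Int => p.1) ∘ fun k => (k, pvCnt arr k)) = id := by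
    funext k; rfl
  rw [this, List.map_id]

lemma pv_ord_perm (arr : List Int) (n : Int) :
    (pvOrd arr n).Perm (PySem.List.pyRange 0 n) :=
  List.mergeSort_perm _ _

lemma pv_ord_nodup (arr : List Int) (n : Int) : (pvOrd arr n).Nodup :=
  (pv_ord_perm arr n).nodup_iff.2 (PySem.List.nodup_pyRange_one 0 n)

lemma pv_mem_ord (arr : List Int) (n : Int) (v : Int) :
    v ∈ pvOrd arr n ↔ 0 ≤ v ∧ v < n := by
  rw [(pv_ord_perm arr n).mem_iff, PySem.List.mem_pyRange_one]

-- ===== renum rule =====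
lemma pv_renum_items (arr : List Int) (n : Int) (hPre : Pre_renumbering arr n) :
    (pvRenumRule arr n).items
      = (PySem.List.enumerate (pvOrd arr n) 0).map (fun p => (p.2, p.1)) := by
  unfold pvRenumRule
  rw [pvEnum_eq, pv_sortfreq_keys arr n hPre]

lemma pv_renum_getD (arr : List Int) (n : Int) (hPre : Pre_renumbering arr n) (v : Int)
    (hv : v ∈ pvOrd arr n) :
    (pvRenumRule arr n).getD v 0 = ((pvOrd arr n).idxOf v : Int) := by
  have hlt : (pvOrd arr n).idxOf v < (pvOrd arr n).length := List.idxOf_lt_length_of_mem hv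
  have hnd : (pvRenumRule arr n).keys.Nodup := by
    simp only [PySem.Dict.keys, pv_renum_items arr n hPre, List.map_map]
    have : ((fun p : Int × Int => p.1) ∘ fun p : Int × Int => (p.2, p.1))
        = fun p : Int × Int => p.2 := by funext p; rfl
    rw [this, PySem.List.map_snd_enumerate]
    exact pv_ord_nodup arr n
  have hmem : (v, ((pvOrd arr n).idxOf v : Int)) ∈ (pvRenumRule arr n).items := by
    rw [pv_renum_items arr n hPre]
    refine List.mem_map.2 ⟨((((pvOrd arr n).idxOf v : Nat) : Int), (pvOrd arr n)[(pvOrd arr n).idxOf v]), ?_, ?_⟩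
    · exact (PySem.List.mem_enumerate_iff _ _ _).2 ⟨(pvOrd arr n).idxOf v, hlt, by simp⟩
    · simp [List.getElem_idxOf]
  exact PySem.Dict.getD_of_mem_items _ hmem hnd 0

-- ===== A = map rank =====
lemma pv_A_eq_map (arr : List Int) (n : Int) (hPre : Pre_renumbering arr n) :
    renumbering arr n = arr.map (fun v => ((pvOrd arr n).idxOf v : Int)) := by
  unfold renumbering
  have h := pv_write_map (fun x => (pvRenumRule arr n).getD x 0) arr []
  simp only [List.length_nil, Nat.cast_zero, List.nil_append, zero_add] at h
  rw [h]
  refine List.map_congr_left ?_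
  intro v hv
  have h2 := hPre v hv
  exact pv_renum_getD arr n hPre v ((pv_mem_ord arr n v).2 ⟨h2.1, h2.2⟩)

-- ===== stability: pvOrd is sorted by the strict order pvRlex =====
lemma pv_le_trans (arr : List Int) : ∀ (a b c : Int),
    decide (pvCnt arr b ≤ pvCnt arr a) = true → decide (pvCnt arr c ≤ pvCnt arr b) = true →
    decide (pvCnt arr c ≤ pvCnt arr a) = true := by
  intro a b c h1 h2
  simp at h1 h2 ⊢
  omega

lemma pv_le_total (arr : List Int) : ∀ (a b : Int),
    (decide (pvCnt arr b ≤ pvCnt arr a) || decide (pvCnt arr a ≤ pvCnt arr b)) = true := by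
  intro a b
  simp
  omega

lemma pv_pyRange_pairwise_lt (n : Int) :
    (PySem.List.pyRange 0 n).Pairwise (· < ·) := by
  by_cases h : 0 ≤ n
  · have : n = ((n.toNat : Nat) : Int) := by omega
    rw [this, PySem.List.pyRange_zero_natCast]
    refine List.Pairwise.map _ ?_ (List.pairwise_lt_range)
    intro a b hab
    exact_mod_cast hab
  · have : PySem.List.pyRange 0 n = [] := by
      refine List.eq_nil_iff_forall_not_mem.2 ?_
      intro x hx
      have := PySem.List.mem_pyRange_one.1 hx
      omega
    simp [this]

-- a count-descending list whose equal-count elements are id-ascending is pairwise pvRlex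
lemma pv_pairwise_rlex_of (arr : List Int) :
    ∀ (M : List Int), M.Pairwise (fun a b => pvCnt arr b ≤ pvCnt arr a) →
    (∀ f : Int, (M.filter (fun c => pvCnt arr c == f)).Pairwise (· < ·)) →
    M.Pairwise (pvRlex arr) := by
  intro M
  induction M with
  | nil => intro _ _; simp
  | cons a t ih =>
    intro hdesc hfil
    rcases List.pairwise_cons.1 hdesc with ⟨ha, ht⟩
    have htfil : ∀ f : Int, (t.filter (fun c => pvCnt arr c == f)).Pairwise (· < ·) := by
      intro f
      have h := hfil f
      rw [List.filter_cons] at h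
      by_cases hp : (pvCnt arr a == f) = true
      · rw [if_pos hp] at h
        exact (List.pairwise_cons.1 h).2
      · rwa [if_neg hp] at h
    refine List.pairwise_cons.2 ⟨?_, ih ht htfil⟩
    intro b hb
    have hba := ha b hb
    by_cases heq : pvCnt arr a = pvCnt arr b
    · refine Or.inr ⟨heq, ?_⟩
      have h := hfil (pvCnt arr a)
      rw [List.filter_cons, if_pos (by simp)] at h
      exact (List.pairwise_cons.1 h).1 b
        (List.mem_filter.2 ⟨hb, by simp [heq]⟩)
    · exact Or.inl (by unfold pvRlex at *; omega)

lemma pv_ord_pairwise (arr : List Int) (n : Int) :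
    (pvOrd arr n).Pairwise (pvRlex arr) := by
  refine pv_pairwise_rlex_of arr (pvOrd arr n) ?_ ?_
  · have h := List.pairwise_mergeSort (pv_le_trans arr) (pv_le_total arr) (PySem.List.pyRange 0 n)
    exact h.imp (fun hd => by simpa using hd)
  · intro f
    -- the class of count f: ascending in the input, a sublist of the stable mergeSort output
    have hFpair : ((PySem.List.pyRange 0 n).filter (fun c => pvCnt arr c == f)).Pairwise (· < ·) :=
      List.Pairwise.filter _ (pv_pyRange_pairwise_lt n)
    have hFle : ((PySem.List.pyRange 0 n).filter (fun c => pvCnt arr c == f)).Pairwise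
        (fun a b => decide (pvCnt arr b ≤ pvCnt arr a) = true) := by
      refine hFpair.imp_of_mem ?_
      intro a b haF hbF _
      have ha := (List.mem_filter.1 haF).2
      have hb := (List.mem_filter.1 hbF).2
      simp at ha hb ⊢
      omega
    have hstab : ((PySem.List.pyRange 0 n).filter (fun c => pvCnt arr c == f)).Sublist (pvOrd arr n) :=
      List.sublist_mergeSort (pv_le_trans arr) (pv_le_total arr) hFle (List.filter_sublist)
    have hsub2 : ((PySem.List.pyRange 0 n).filter (fun c => pvCnt arr c == f)).Sublist
        ((pvOrd arr n).filter (fun c => pvCnt arr c == f)) := by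
      have h := List.Sublist.filter (fun c => pvCnt arr c == f) hstab
      rwa [List.filter_filter,
        List.filter_congr (p := fun a => pvCnt arr a == f && pvCnt arr a == f)
          (q := fun c => pvCnt arr c == f) (fun a _ => by simp [Bool.and_self])] at h
    have hperm : ((pvOrd arr n).filter (fun c => pvCnt arr c == f)).Perm
        ((PySem.List.pyRange 0 n).filter (fun c => pvCnt arr c == f)) :=
      List.Perm.filter _ (pv_ord_perm arr n)
    have heq : ((PySem.List.pyRange 0 n).filter (fun c => pvCnt arr c == f))
        = (pvOrd arr n).filter (fun c => pvCnt arr c == f) :=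
      hsub2.eq_of_length (by rw [hperm.length_eq])
    rw [← heq]
    exact hFpair

-- ===== the counting-sort order: same membership, same sortedness =====
lemma pv_fs_pairwise (arr : List Int) : (pvFs arr).Pairwise (fun a b => b < a) := by
  unfold pvFs
  rw [List.pairwise_map]
  refine List.pairwise_lt_range.imp ?_
  intro a b hab
  omega

lemma pv_fs_nodup (arr : List Int) : (pvFs arr).Nodup :=
  (pv_fs_pairwise arr).imp (fun h => by omega)

lemma pv_mem_fs (arr : List Int) (f : Int) :
    f ∈ pvFs arr ↔ 0 ≤ f ∧ f ≤ (arr.length : Int) := by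
  unfold pvFs
  simp only [List.mem_map, List.mem_range]
  constructor
  · rintro ⟨k, hk, rfl⟩
    omega
  · intro ⟨h0, h1⟩
    exact ⟨((arr.length : Int) - f).toNat, by omega, by omega⟩

lemma pv_cnt_bounds (arr : List Int) (x : Int) :
    0 ≤ pvCnt arr x ∧ pvCnt arr x ≤ (arr.length : Int) := by
  unfold pvCnt
  constructor
  · positivity
  · exact_mod_cast List.count_le_length

lemma pv_sum_ite_count (k : Int) (c : Nat) :
    ∀ (l : List Int), (l.map (fun f => if k = f then c else 0)).sum = c * l.count k := by
  intro l
  induction l with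
  | nil => simp
  | cons f l ih =>
    simp only [List.map_cons, List.sum_cons, ih, List.count_cons]
    by_cases h : k = f
    · subst h
      simp only [beq_self_eq_true, if_true, Nat.mul_add, Nat.mul_one]
      omega
    · have h2 : ¬ (f == k) := by simpa using fun hh => h hh.symm
      simp [h, h2]

lemma pv_cord_perm (arr : List Int) (n : Int) :
    (pvCOrd arr n).Perm (PySem.List.pyRange 0 n) := by
  rw [List.perm_iff_count]
  intro x
  unfold pvCOrd
  rw [List.count_flatMap]
  have hcnt : ∀ f : Int,
      (List.count x ∘ fun f => (PySem.List.pyRange 0 n).filter (fun c => pvCnt arr c == f)) f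
        = if pvCnt arr x = f then List.count x ((PySem.List.pyRange 0 n).filter (fun c => pvCnt arr c == f)) else 0 := by
    intro f
    by_cases h : pvCnt arr x = f
    · simp [h]
    · simp only [Function.comp_apply, h, if_false]
      refine List.count_eq_zero_of_not_mem ?_
      intro hx
      have := List.mem_filter.1 hx
      exact h (by simpa using this.2)
  by_cases hx : x ∈ PySem.List.pyRange 0 n
  · have hfil : ∀ f : Int, pvCnt arr x = f →
        List.count x ((PySem.List.pyRange 0 n).filter (fun c => pvCnt arr c == f)) = 1 := by
      intro f hf
      rw [List.count_filter (by simpa using hf)]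
      exact List.count_eq_one_of_mem (PySem.List.nodup_pyRange_one 0 n) hx
    have hmap : (pvFs arr).map
        (List.count x ∘ fun f => (PySem.List.pyRange 0 n).filter (fun c => pvCnt arr c == f))
        = (pvFs arr).map (fun f => if pvCnt arr x = f then 1 else 0) := by
      refine List.map_congr_left ?_
      intro f _
      rw [hcnt f]
      by_cases h : pvCnt arr x = f
      · simp [h, hfil f h]
      · simp [h]
    rw [hmap]
    have hsum : ((pvFs arr).map (fun f => if pvCnt arr x = f then 1 else 0)).sum
        = 1 * (pvFs arr).count (pvCnt arr x) := by
      have h := pv_sum_ite_count (pvCnt arr x) 1 (pvFs arr)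
      simpa using h
    rw [hsum]
    have hmemfs : pvCnt arr x ∈ pvFs arr := by
      rw [pv_mem_fs]
      exact pv_cnt_bounds arr x
    rw [List.count_eq_one_of_mem (pv_fs_nodup arr) hmemfs,
        List.count_eq_one_of_mem (PySem.List.nodup_pyRange_one 0 n) hx]
  · have hmap : (pvFs arr).map
        (List.count x ∘ fun f => (PySem.List.pyRange 0 n).filter (fun c => pvCnt arr c == f))
        = (pvFs arr).map (fun _ => 0) := by
      refine List.map_congr_left ?_
      intro f _
      simp only [Function.comp_apply]
      refine List.count_eq_zero_of_not_mem ?_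
      intro hmem
      exact hx (List.mem_filter.1 hmem).1
    rw [hmap, List.count_eq_zero_of_not_mem hx]
    simp

lemma pv_cord_pairwise (arr : List Int) (n : Int) :
    (pvCOrd arr n).Pairwise (pvRlex arr) := by
  unfold pvCOrd
  rw [List.pairwise_flatMap]
  constructor
  · intro f _
    have h1 : ((PySem.List.pyRange 0 n).filter (fun c => pvCnt arr c == f)).Pairwise (· < ·) :=
      List.Pairwise.filter _ (pv_pyRange_pairwise_lt n)
    refine h1.imp_of_mem ?_
    intro a b ha hb hab
    have ha' := (List.mem_filter.1 ha).2
    have hb' := (List.mem_filter.1 hb).2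
    exact Or.inr ⟨by simp at ha' hb'; omega, hab⟩
  · refine (pv_fs_pairwise arr).imp_of_mem ?_
    intro f1 f2 _ _ h12 x hx y hy
    have hx' := (List.mem_filter.1 hx).2
    have hy' := (List.mem_filter.1 hy).2
    refine Or.inl ?_
    simp at hx' hy'
    omega

-- the two orders coincide
lemma pv_ord_eq_cord (arr : List Int) (n : Int) :
    pvOrd arr n = pvCOrd arr n := by
  refine List.Perm.eq_of_pairwise ?_ (pv_ord_pairwise arr n) (pv_cord_pairwise arr n)
    ((pv_ord_perm arr n).trans (pv_cord_perm arr n).symm)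
  intro a b _ _ h1 h2
  unfold pvRlex at h1 h2
  rcases h1 with h1 | ⟨e1, l1⟩ <;> rcases h2 with h2 | ⟨e2, l2⟩ <;> omega

-- ===== B-side stage 1: counts[c] = arr.count c =====
lemma pv_count_fold : ∀ (l : List Int) (cs : List Int), (∀ v ∈ l, 0 ≤ v ∧ v < (cs.length : Int)) →
    (l.foldl (fun cs v => cs.set v.toNat (PySem.List.pyGetD cs v 0 + 1)) cs).length = cs.length ∧
    ∀ j : Nat, (l.foldl (fun cs v => cs.set v.toNat (PySem.List.pyGetD cs v 0 + 1)) cs).getD j 0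
      = cs.getD j 0 + (l.count (j : Int) : Int) := by
  intro l
  induction l with
  | nil => intro cs _; simp
  | cons v l ih =>
    intro cs hb
    have hv := hb v (by simp)
    have hlen : (cs.set v.toNat (PySem.List.pyGetD cs v 0 + 1)).length = cs.length := by simp
    have hb' : ∀ w ∈ l, 0 ≤ w ∧ w < ((cs.set v.toNat (PySem.List.pyGetD cs v 0 + 1)).length : Int) := by
      rw [hlen]; intro w hw; exact hb w (by simp [hw])
    obtain ⟨ihlen, ihget⟩ := ih _ hb'
    simp only [List.foldl_cons]
    refine ⟨by rw [ihlen, hlen], ?_⟩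
    intro j
    rw [ihget j]
    have hvt : v.toNat < cs.length := by omega
    have hget : PySem.List.pyGetD cs v 0 = cs.getD v.toNat 0 :=
      PySem.List.pyGetD_of_nonneg cs 0 hv.1
    by_cases hj : v.toNat = j
    · have hvj : v = (j : Int) := by omega
      have : (cs.set v.toNat (PySem.List.pyGetD cs v 0 + 1)).getD j 0 = cs.getD j 0 + 1 := by
        rw [hget, ← hj, List.getD_eq_getElem?_getD, List.getElem?_set_self (by simpa using hvt)]
        rw [List.getD_eq_getElem?_getD, List.getElem?_eq_getElem hvt]
        rfl
      rw [this, List.count_cons]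
      simp [hvj.symm]
      push_cast
      ring
    · have : (cs.set v.toNat (PySem.List.pyGetD cs v 0 + 1)).getD j 0 = cs.getD j 0 := by
        simp [List.getD_eq_getElem?_getD, List.getElem?_set_ne hj]
      rw [this, List.count_cons]
      have hvj : ¬ v = (j : Int) := by omega
      simp [hvj]

lemma pv_counts_getD (arr : List Int) (n : Int) (hPre : Pre_renumbering arr n) (c : Int)
    (hc : 0 ≤ c) (hc2 : c < n) :
    PySem.List.pyGetD (pvCounts arr n) c 0 = pvCnt arr c := by
  rw [PySem.List.pyGetD_of_nonneg _ 0 hc]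
  unfold pvCounts
  have hb : ∀ v ∈ arr, 0 ≤ v ∧ v < ((PySem.List.pyRepeat [(0 : Int)] n).length : Int) := by
    intro v hv
    have := hPre v hv
    rw [PySem.List.pyRepeat_singleton]
    simp
    omega
  obtain ⟨_, hget⟩ := pv_count_fold arr _ hb
  rw [hget c.toNat]
  have h0 : (PySem.List.pyRepeat [(0 : Int)] n).getD c.toNat 0 = 0 := by
    rw [PySem.List.pyRepeat_singleton]
    cases h : (List.replicate n.toNat (0 : Int))[c.toNat]? with
    | none => simp [List.getD_eq_getElem?_getD, h]
    | some x =>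
      have hx := List.mem_of_getElem? h
      simp only [List.mem_replicate] at hx
      simp [List.getD_eq_getElem?_getD, h, hx.2]
  rw [h0]
  have : ((c.toNat : Nat) : Int) = c := by omega
  rw [this]
  unfold pvCnt
  ring

-- ===== B-side stage 2: by_freq[f] = clusters with count f, ascending =====
lemma pv_bucket_fold (g : Int → Int) :
    ∀ (l : List Int) (bf : List (List Int)), (∀ c ∈ l, 0 ≤ g c ∧ g c < (bf.length : Int)) →
    (l.foldl (fun bf c => bf.set (g c).toNat (PySem.List.pyGetD bf (g c) [] ++ [c])) bf).length = bf.length ∧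
    ∀ j : Nat, (l.foldl (fun bf c => bf.set (g c).toNat (PySem.List.pyGetD bf (g c) [] ++ [c])) bf).getD j []
      = bf.getD j [] ++ l.filter (fun c => g c == (j : Int)) := by
  intro l
  induction l with
  | nil => intro bf _; simp
  | cons c l ih =>
    intro bf hb
    have hc := hb c (by simp)
    have hct : (g c).toNat < bf.length := by omega
    have hlen : (bf.set (g c).toNat (PySem.List.pyGetD bf (g c) [] ++ [c])).length = bf.length := by simp
    have hb' : ∀ w ∈ l, 0 ≤ g w ∧ g w < ((bf.set (g c).toNat (PySem.List.pyGetD bf (g c) [] ++ [c])).length : Int) := by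
      rw [hlen]; intro w hw; exact hb w (by simp [hw])
    obtain ⟨ihlen, ihget⟩ := ih _ hb'
    simp only [List.foldl_cons]
    refine ⟨by rw [ihlen, hlen], ?_⟩
    intro j
    rw [ihget j]
    have hget : PySem.List.pyGetD bf (g c) [] = bf.getD (g c).toNat [] :=
      PySem.List.pyGetD_of_nonneg bf [] hc.1
    by_cases hj : (g c).toNat = j
    · have hgj : g c == (j : Int) := by simp; omega
      have heq : (bf.set (g c).toNat (PySem.List.pyGetD bf (g c) [] ++ [c])).getD j []
          = bf.getD j [] ++ [c] := by
        rw [hget, ← hj, List.getD_eq_getElem?_getD, List.getElem?_set_self (by simpa using hct)]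
        rw [List.getD_eq_getElem?_getD, List.getElem?_eq_getElem hct]
        rfl
      rw [heq]
      simp only [List.filter_cons, hgj, if_true, List.append_assoc]
      rfl
    · have hgj : ¬ (g c == (j : Int)) := by simp; omega
      have : (bf.set (g c).toNat (PySem.List.pyGetD bf (g c) [] ++ [c])).getD j []
          = bf.getD j [] := by
        simp [List.getD_eq_getElem?_getD, List.getElem?_set_ne hj]
      rw [this]
      simp [List.filter_cons, hgj]

lemma pv_byfreq_init_length (arr : List Int) :
    ((PySem.List.pyRange 0 ((arr.length : Int) + 1)).map (fun _ => ([] : List Int))).length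
      = arr.length + 1 := by
  have : ((arr.length : Int) + 1) = ((arr.length + 1 : Nat) : Int) := by push_cast; ring
  rw [this, PySem.List.pyRange_zero_natCast]
  simp

lemma pv_byfreq_init_getD (arr : List Int) (j : Nat) :
    ((PySem.List.pyRange 0 ((arr.length : Int) + 1)).map (fun _ => ([] : List Int))).getD j [] = [] := by
  cases h : ((PySem.List.pyRange 0 ((arr.length : Int) + 1)).map (fun _ => ([] : List Int)))[j]? with
  | none => simp [List.getD_eq_getElem?_getD, h]
  | some x =>
    have hx := List.mem_of_getElem? h
    simp only [List.mem_map] at hx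
    obtain ⟨_, _, hx⟩ := hx
    simp [List.getD_eq_getElem?_getD, h, ← hx]

lemma pv_byfreq_spec (arr : List Int) (n : Int) (hPre : Pre_renumbering arr n) :
    (pvByFreq arr n).length = arr.length + 1 ∧
    ∀ j : Nat, (pvByFreq arr n).getD j []
      = (PySem.List.pyRange 0 n).filter (fun c => pvCnt arr c == (j : Int)) := by
  rw [show pvByFreq arr n = (PySem.List.pyRange 0 n).foldl
    (fun bf c =>
      bf.set (PySem.List.pyGetD (pvCounts arr n) c 0).toNat
        (PySem.List.pyGetD bf (PySem.List.pyGetD (pvCounts arr n) c 0) [] ++ [c]))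
    ((PySem.List.pyRange 0 ((arr.length : Int) + 1)).map (fun _ => ([] : List Int))) from rfl]
  have hcongr : (PySem.List.pyRange 0 n).foldl
      (fun bf c => bf.set (PySem.List.pyGetD (pvCounts arr n) c 0).toNat
        (PySem.List.pyGetD bf (PySem.List.pyGetD (pvCounts arr n) c 0) [] ++ [c]))
      ((PySem.List.pyRange 0 ((arr.length : Int) + 1)).map (fun _ => ([] : List Int)))
      = (PySem.List.pyRange 0 n).foldl
      (fun bf c => bf.set (pvCnt arr c).toNat
        (PySem.List.pyGetD bf (pvCnt arr c) [] ++ [c]))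
      ((PySem.List.pyRange 0 ((arr.length : Int) + 1)).map (fun _ => ([] : List Int))) := by
    refine PySem.List.foldl_congr_mem _ _ _ _ ?_
    intro acc c hc
    have hm := PySem.List.mem_pyRange_one.1 hc
    rw [pv_counts_getD arr n hPre c hm.1 hm.2]
  rw [hcongr]
  have hb : ∀ c ∈ PySem.List.pyRange 0 n, 0 ≤ pvCnt arr c ∧
      pvCnt arr c < (((PySem.List.pyRange 0 ((arr.length : Int) + 1)).map (fun _ => ([] : List Int))).length : Int) := by
    intro c _
    have := pv_cnt_bounds arr c
    rw [pv_byfreq_init_length arr]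
    push_cast
    omega
  obtain ⟨hlen, hget⟩ := pv_bucket_fold (pvCnt arr) (PySem.List.pyRange 0 n) _ hb
  refine ⟨by rw [hlen, pv_byfreq_init_length arr], ?_⟩
  intro j
  rw [hget j, pv_byfreq_init_getD arr j]
  simp

-- ===== B-side stage 3: the rank array =====
lemma pv_rank_fold :
    ∀ (L : List Int) (rk : List Int) (r : Int), L.Nodup → (∀ c ∈ L, 0 ≤ c ∧ c < (rk.length : Int)) →
    (L.foldl (fun (s : List Int × Int) c => (s.1.set c.toNat s.2, s.2 + 1)) (rk, r)).1.length = rk.length ∧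
    ∀ j : Nat, (L.foldl (fun (s : List Int × Int) c => (s.1.set c.toNat s.2, s.2 + 1)) (rk, r)).1.getD j 0
      = if (j : Int) ∈ L then r + (L.idxOf (j : Int) : Int) else rk.getD j 0 := by
  intro L
  induction L with
  | nil => intro rk r _ _; simp
  | cons c L ih =>
    intro rk r hnd hb
    have hc := hb c (by simp)
    have hct : c.toNat < rk.length := by omega
    rcases List.nodup_cons.1 hnd with ⟨hcn, hnd'⟩
    have hb' : ∀ w ∈ L, 0 ≤ w ∧ w < (((rk.set c.toNat r)).length : Int) := by
      simp only [List.length_set]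
      intro w hw; exact hb w (by simp [hw])
    obtain ⟨ihlen, ihget⟩ := ih (rk.set c.toNat r) (r + 1) hnd' hb'
    simp only [List.foldl_cons]
    refine ⟨by rw [ihlen]; simp, ?_⟩
    intro j
    rw [ihget j]
    by_cases hjL : (j : Int) ∈ L
    · have hjc : ¬ (j : Int) = c := fun h => hcn (h ▸ hjL)
      have hmem : (j : Int) ∈ c :: L := by simp [hjL]
      rw [if_pos hjL, if_pos hmem]
      have : (c :: L).idxOf (j : Int) = L.idxOf (j : Int) + 1 := by
        rw [List.idxOf_cons]
        simp [show ¬ (c == (j:Int)) by simpa using (fun h => hjc (by omega))]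
      rw [this]
      push_cast
      ring
    · rw [if_neg hjL]
      by_cases hjc : (j : Int) = c
      · have hmem : (j : Int) ∈ c :: L := by simp [hjc]
        rw [if_pos hmem]
        have hidx : (c :: L).idxOf (j : Int) = 0 := by
          rw [hjc, List.idxOf_cons_self]
        rw [hidx]
        have hcj : c.toNat = j := by omega
        rw [← hcj]
        simp [List.getD_eq_getElem?_getD]
        rw [List.getElem?_set_self']
        rw [List.getElem?_eq_getElem hct]
        simp
      · have hmem : ¬ (j : Int) ∈ c :: L := by simp [hjc, hjL]
        rw [if_neg hmem]
        have hcj : ¬ c.toNat = j := by omega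
        simp [List.getD_eq_getElem?_getD, List.getElem?_set_ne hcj]

lemma pv_fs_eq (arr : List Int) :
    PySem.List.pyRange (arr.length : Int) (-1) (-1) = pvFs arr := by
  unfold PySem.List.pyRange pvFs
  have h1 : ¬ ((-1 : Int) = 0) := by omega
  have h2 : ¬ ((0 : Int) < -1) := by omega
  have h3 : ((-1 : Int) < (arr.length : Int)) := by omega
  simp only [h1, if_false, h2, h3, if_true]
  have hcnt : (((arr.length : Int) - (-1) + (-(-1)) - 1) / (-(-1))).toNat = arr.length + 1 := by
    norm_num
  rw [hcnt]
  refine List.map_congr_left ?_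
  intro k _
  ring

-- rank = position in pvCOrd
lemma pv_rank_spec (arr : List Int) (n : Int) (hPre : Pre_renumbering arr n) :
    (pvRankR arr n).1.length = n.toNat ∧
    ∀ j : Nat, (j : Int) ∈ pvCOrd arr n →
      (pvRankR arr n).1.getD j 0 = ((pvCOrd arr n).idxOf (j : Int) : Int) := by
  rw [show pvRankR arr n = (PySem.List.pyRange (arr.length : Int) (-1) (-1)).foldl
    (fun s f => (PySem.List.pyGetD (pvByFreq arr n) f []).foldl
      (fun (s : List Int × Int) c => (s.1.set c.toNat s.2, s.2 + 1)) s)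
    (PySem.List.pyRepeat [(0 : Int)] n, 0) from rfl]
  rw [pv_fs_eq arr]
  obtain ⟨hbflen, hbfget⟩ := pv_byfreq_spec arr n hPre
  have hcongr : (pvFs arr).foldl
      (fun s f => (PySem.List.pyGetD (pvByFreq arr n) f []).foldl
        (fun (s : List Int × Int) c => (s.1.set c.toNat s.2, s.2 + 1)) s)
      (PySem.List.pyRepeat [(0 : Int)] n, 0)
      = (pvFs arr).foldl
      (fun s f => ((PySem.List.pyRange 0 n).filter (fun c => pvCnt arr c == f)).foldl
        (fun (s : List Int × Int) c => (s.1.set c.toNat s.2, s.2 + 1)) s)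
      (PySem.List.pyRepeat [(0 : Int)] n, 0) := by
    refine PySem.List.foldl_congr_mem _ _ _ _ ?_
    intro acc f hf
    have hm := (pv_mem_fs arr f).1 hf
    have : PySem.List.pyGetD (pvByFreq arr n) f [] = (pvByFreq arr n).getD f.toNat [] :=
      PySem.List.pyGetD_of_nonneg _ [] hm.1
    rw [this, hbfget f.toNat]
    have : ((f.toNat : Nat) : Int) = f := by omega
    rw [this]
  rw [hcongr, ← List.foldl_flatMap]
  have hflat : (pvFs arr).flatMap (fun f => (PySem.List.pyRange 0 n).filter (fun c => pvCnt arr c == f))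
      = pvCOrd arr n := rfl
  rw [hflat]
  have hnd : (pvCOrd arr n).Nodup :=
    (pv_cord_perm arr n).nodup_iff.2 (PySem.List.nodup_pyRange_one 0 n)
  have hb : ∀ c ∈ pvCOrd arr n, 0 ≤ c ∧ c < ((PySem.List.pyRepeat [(0 : Int)] n).length : Int) := by
    intro c hc
    have := PySem.List.mem_pyRange_one.1 ((pv_cord_perm arr n).mem_iff.1 hc)
    rw [PySem.List.pyRepeat_singleton]
    simp
    omega
  obtain ⟨hlen, hget⟩ := pv_rank_fold (pvCOrd arr n) (PySem.List.pyRepeat [(0 : Int)] n) 0 hnd hb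
  constructor
  · rw [hlen, PySem.List.pyRepeat_singleton]; simp
  · intro j hj
    rw [hget j, if_pos hj]
    ring

-- ===== B = map rank =====
lemma pv_B_eq_map (arr : List Int) (n : Int) (hPre : Pre_renumbering arr n) :
    renumbering_alt arr n = arr.map (fun v => ((pvCOrd arr n).idxOf v : Int)) := by
  unfold renumbering_alt
  have h := pv_write_map (fun x => PySem.List.pyGetD (pvRankR arr n).1 x 0) arr []
  simp only [List.length_nil, Nat.cast_zero, List.nil_append, zero_add] at h
  rw [h]
  refine List.map_congr_left ?_
  intro v hv
  have h2 := hPre v hv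
  obtain ⟨hlen, hget⟩ := pv_rank_spec arr n hPre
  have hvm : v ∈ pvCOrd arr n := by
    rw [(pv_cord_perm arr n).mem_iff, PySem.List.mem_pyRange_one]
    omega
  have hvt : ((v.toNat : Nat) : Int) = v := by omega
  rw [PySem.List.pyGetD_of_nonneg _ 0 h2.1, hget v.toNat (by rw [hvt]; exact hvm), hvt]

-- ===== VERDICT (by name: the statement is the Claim_ definition above) =====
theorem renumbering_spec : Claim_equal_renumbering := by
  intro arr n _hDom hPre
  unfold Spec_renumbering
  rw [pv_A_eq_map arr n hPre, pv_B_eq_map arr n hPre, pv_ord_eq_cord arr n]
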